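-- pv_equiv track=rewrite | github.com/qeedquan/challenges | codegolf/olympic-rings-sequence.py | olympic_rings
-- ===== SOURCE A (Python) =====
-- def olympic_rings(n):
--     if n < 1:
--         return 0
--
--     n *= 6
--     s = ''
--     for i in range(1, n*2):
--         s += str(i)
--
--     r = 0
--     for p in (n-2, n-4, n-6, n*2 - 4, n*2 - 6):
--         r += int(s[p])
--     return r
-- ===== SOURCE B (Python) =====
-- def olympic_rings(n):
--     if n < 1:
--         return 0
--     m = 6 * n
--     r = 0
--     for p in (m - 2, m - 4, m - 6, 2 * m - 4, 2 * m - 6):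
--         # Champernowne indexing: find the digit at 0-based position p of
--         # "123456789101112..." without building the string.
--         q = p
--         d, count, start = 1, 9, 1
--         while q >= d * count:
--             q -= d * count
--             d += 1
--             count *= 10
--             start *= 10
--         num = start + q // d
--         r += (num // 10 ** (d - 1 - q % d)) % 10
--     return r
-- ===== Notes on version B (the rewrite author's own statement) =====
-- stated objective: faster
-- what changed: B never builds the concatenated string: each of the five digits is computed directly by Champernowne indexing (skip whole blocks of equal-length numbers, then extract the digit of the hit number arithmetically), replacing A's O(n log n) string construction.
import Mathlib
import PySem

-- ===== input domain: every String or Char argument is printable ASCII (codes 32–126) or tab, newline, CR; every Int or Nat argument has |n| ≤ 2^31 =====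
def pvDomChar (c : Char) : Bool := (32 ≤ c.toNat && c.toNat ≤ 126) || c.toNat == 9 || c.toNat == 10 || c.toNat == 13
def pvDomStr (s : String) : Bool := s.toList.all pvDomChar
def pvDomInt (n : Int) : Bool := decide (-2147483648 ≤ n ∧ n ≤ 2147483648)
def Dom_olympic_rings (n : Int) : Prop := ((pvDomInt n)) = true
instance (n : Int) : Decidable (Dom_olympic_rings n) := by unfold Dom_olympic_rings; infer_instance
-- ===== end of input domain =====

-- B computes each of the five digits directly by Champernowne indexing (skipping whole
-- blocks of equal-length numbers, then extracting the digit arithmetically) instead of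
-- building the concatenated string as A does; objective: faster.

-- ===== PORT A =====
-- int(s[p]) is ported as ((pyGet? s p).bind (fun c => ofChars? [c])).getD 0 — exact here
-- because every position read is in range and holds a decimal digit, so Python never
-- raises (proved below).
def olympic_rings (n : Int) : Int :=
  if n < 1 then 0
  else
    let m := n * 6
    let s : String :=
      (PySem.List.pyRange 1 (m * 2) 1).foldl (fun s i => s ++ PySem.Int.toStr i) ""
    [m - 2, m - 4, m - 6, m * 2 - 4, m * 2 - 6].foldl
      (fun r p => r + ((PySem.Str.pyGet? s p).bind (fun c => PySem.Int.ofChars? [c])).getD 0) 0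

-- ===== PORT B =====
-- Source B's while loop 'while q >= d*count: q -= d*count; d += 1; count *= 10; start *= 10',
-- written with fuel q.toNat + 1 (each pass subtracts d*count ≥ 9 from q, so the fuel is
-- never exhausted on the reachable states; the fuel-0 branch returns the current state).
def champLoop : Nat → Int → Int → Int → Int → Int × Int × Int
  | 0, q, d, _count, start => (q, d, start)
  | f + 1, q, d, count, start =>
      if d * count ≤ q then champLoop f (q - d * count) (d + 1) (count * 10) (start * 10)
      else (q, d, start)

-- '10 ** (d - 1 - q % d)' has a nonnegative exponent on every reachable state
-- (q % d < d), so the '.toNat' on the exponent is exact.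
def olympic_rings_alt (n : Int) : Int :=
  if n < 1 then 0
  else
    let m := 6 * n
    [m - 2, m - 4, m - 6, 2 * m - 4, 2 * m - 6].foldl (fun r p =>
      let t := champLoop (p.toNat + 1) p 1 9 1
      let q := t.1
      let d := t.2.1
      let start := t.2.2
      let num := start + PySem.Int.floordiv q d
      r + PySem.Int.mod (PySem.Int.floordiv num (10 ^ ((d - 1 - PySem.Int.mod q d).toNat))) 10) 0

-- ===== PRECONDITION & SPEC =====
def Spec_olympic_rings (n : Int) (out : Int) : Prop := out = olympic_rings_alt n
instance (n : Int) (out : Int) : Decidable (Spec_olympic_rings n out) := by unfold Spec_olympic_rings; infer_instance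

-- ===== CLAIM (what is proved, stated in full; the proofs are below) =====
def Claim_equal_olympic_rings : Prop := ∀ (n : Int), Dom_olympic_rings n → Spec_olympic_rings n (olympic_rings n)

-- ===== LEMMAS AND PROOFS =====

-- the digit string A builds, on the List Char side: concat of str(i), i in [a, b)
def olrCat (a b : Int) : List Char := (PySem.List.pyRange a b 1).flatMap PySem.Int.toChars

-- cumulative length of olrCat 1 (10^e): sum over the digit-length blocks
def olrCsum : Nat → Int
  | 0 => 0
  | e + 1 => olrCsum e + (e + 1) * (9 * 10 ^ e)

theorem olr_strfold (l : List Int) (s : String) :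
    (l.foldl (fun s i => s ++ PySem.Int.toStr i) s).toList
      = l.foldl (fun c i => c ++ PySem.Int.toChars i) s.toList := by
  induction l generalizing s with
  | nil => rfl
  | cons a l ih =>
    simp only [List.foldl_cons]
    rw [ih]
    simp [PySem.Int.toList_toStr]

theorem olr_foldA (k : Int) :
    ((PySem.List.pyRange 1 k 1).foldl (fun s i => s ++ PySem.Int.toStr i) "").toList
      = olrCat 1 k := by
  rw [olr_strfold]
  unfold olrCat
  simpa using PySem.List.foldl_append_eq_flatMap PySem.Int.toChars (PySem.List.pyRange 1 k 1) []

-- Nat.toDigits (the code behind str(n)) in terms of Nat.digits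
theorem olr_toDigitsCore_eq : ∀ (f n : Nat) (acc : List Char), 0 < n → n ≤ f →
    Nat.toDigitsCore 10 f n acc = ((Nat.digits 10 n).map Nat.digitChar).reverse ++ acc := by
  intro f
  induction f with
  | zero => intro n acc h1 h2; omega
  | succ f ih =>
    intro n acc h1 h2
    rw [Nat.toDigitsCore]
    by_cases h : n / 10 = 0
    · have hn : n < 10 := by omega
      rw [if_pos h, Nat.digits_def' (by norm_num) h1, h, Nat.digits_zero]
      simp
    · rw [if_neg h]
      rw [ih (n / 10) _ (by omega) (by omega)]
      rw [Nat.digits_def' (by norm_num) h1]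
      simp

theorem olr_toChars_pos (i : Int) (h : 0 < i) :
    PySem.Int.toChars i = ((Nat.digits 10 i.toNat).map Nat.digitChar).reverse := by
  unfold PySem.Int.toChars
  rw [if_neg (by omega)]
  show Nat.toDigitsCore 10 (i.toNat + 1) i.toNat [] = _
  rw [olr_toDigitsCore_eq (i.toNat + 1) i.toNat [] (by omega) (by omega)]
  simp

theorem olr_length_toChars (e : Nat) (i : Int) (h1 : (10 : Int) ^ e ≤ i) (h2 : i < 10 ^ (e + 1)) :
    (PySem.Int.toChars i).length = e + 1 := by
  have hi : 0 < i := lt_of_lt_of_le (by positivity) h1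
  rw [olr_toChars_pos i hi]
  have h10 : ((10:Int) ^ e) = ((10 ^ e : Nat) : Int) := by push_cast; ring
  have h11 : ((10:Int) ^ (e+1)) = ((10 ^ (e+1) : Nat) : Int) := by push_cast; ring
  rw [h10] at h1; rw [h11] at h2
  have h1' : 10 ^ e ≤ i.toNat := by omega
  have h2' : i.toNat < 10 ^ (e + 1) := by omega
  have hne : i.toNat ≠ 0 := by omega
  simp [Nat.length_digits 10 i.toNat (by norm_num) hne,
    Nat.log_eq_of_pow_le_of_lt_pow h1' h2']

theorem olr_getElem_toChars (e r : Nat) (i : Int) (h1 : (10 : Int) ^ e ≤ i)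
    (h2 : i < 10 ^ (e + 1)) (hr : r ≤ e) :
    (PySem.Int.toChars i)[r]? = some (Nat.digitChar (i.toNat / 10 ^ (e - r) % 10)) := by
  have hi : 0 < i := lt_of_lt_of_le (by positivity) h1
  have hlen : (PySem.Int.toChars i).length = e + 1 := olr_length_toChars e i h1 h2
  rw [olr_toChars_pos i hi] at hlen ⊢
  have hr' : r < ((Nat.digits 10 i.toNat).map Nat.digitChar).length := by
    simp at hlen ⊢; omega
  rw [List.getElem?_reverse hr']
  have hL : ((Nat.digits 10 i.toNat).map Nat.digitChar).length = e + 1 := by simpa using hlen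
  rw [hL]
  have hidx : e + 1 - 1 - r = e - r := by omega
  rw [hidx]
  have her : e - r < (Nat.digits 10 i.toNat).length := by simp at hL; omega
  rw [List.getElem?_map]
  rw [List.getElem?_eq_getElem her]
  simp only [Option.map_some]
  congr 1
  rw [← List.getD_eq_getElem (Nat.digits 10 i.toNat) 0 her]
  exact congrArg _ (Nat.getD_digits i.toNat (e - r) (by norm_num))

theorem olr_cat_split (a b c : Int) (h1 : a ≤ b) (h2 : b ≤ c) :
    olrCat a c = olrCat a b ++ olrCat b c := by
  unfold olrCat
  rw [PySem.List.pyRange_one_append a b c h1 h2, List.flatMap_append]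

theorem olr_length_cat_const (d : Nat) : ∀ (k : Nat) (a : Int),
    (∀ i, a ≤ i → i < a + k → (PySem.Int.toChars i).length = d) →
    (olrCat a (a + k)).length = k * d := by
  intro k
  induction k with
  | zero =>
    intro a _
    have hnil : olrCat a (a + ((0:Nat):Int)) = [] := by
      unfold olrCat
      rw [PySem.List.pyRange_one_eq_nil (by omega)]
      rfl
    rw [hnil]
    simp
  | succ k ih =>
    intro a h
    have he : a + ((k+1:Nat):Int) = (a+1) + ((k:Nat):Int) := by push_cast; ring
    have hcons : olrCat a (a + ((k+1:Nat):Int))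
        = PySem.Int.toChars a ++ olrCat (a+1) ((a+1) + (k:Nat)) := by
      rw [he]
      unfold olrCat
      rw [PySem.List.pyRange_one_cons (by omega : a < a + 1 + ((k:Nat):Int)), List.flatMap_cons]
    rw [hcons, List.length_append, ih (a+1) (fun i hi hi2 => h i (by omega) (by omega)),
      h a (by omega) (by omega)]
    ring

theorem olr_cat_get_const (d : Nat) : ∀ (k : Nat) (a b q : Int),
    (∀ i, a ≤ i → i < b → (PySem.Int.toChars i).length = d) →
    a + k < b → (k : Int) * d ≤ q → q < ((k : Int) + 1) * d →
    PySem.List.pyGet? (olrCat a b) q = (PySem.Int.toChars (a + k))[(q - k * d).toNat]? := by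
  intro k
  induction k with
  | zero =>
    intro a b q h hk hq1 hq2
    unfold olrCat
    rw [PySem.List.pyRange_one_cons (by omega : a < b), List.flatMap_cons]
    simp only [Nat.cast_zero, zero_mul] at hq1 hq2 ⊢
    rw [zero_add, one_mul] at hq2
    rw [PySem.List.pyGet?_of_nonneg _ hq1]
    rw [List.getElem?_append_left (by rw [h a le_rfl (by omega)]; omega)]
    simp
  | succ k ih =>
    intro a b q h hk hq1 hq2
    have hc1 : ((k+1 : Nat) : Int) * d = (k:Int) * d + d := by push_cast; ring
    have hc2 : (((k+1 : Nat) : Int) + 1) * d = (k:Int) * d + d + d := by push_cast; ring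
    have hc3 : (((k : Nat) : Int) + 1) * d = (k:Int) * d + d := by ring
    rw [hc1] at hq1
    rw [hc2] at hq2
    have hdnn : (0:Int) ≤ (k:Int) * d := by positivity
    unfold olrCat
    rw [PySem.List.pyRange_one_cons (by omega : a < b), List.flatMap_cons]
    have hd : (PySem.Int.toChars a).length = d := h a le_rfl (by omega)
    rw [PySem.List.pyGet?_of_nonneg _ (by omega : (0:Int) ≤ q)]
    rw [List.getElem?_append_right (by rw [hd]; omega)]
    have hrec := ih (a+1) b (q - d) (fun i hi hi2 => h i (by omega) hi2)
      (by push_cast at hk ⊢; omega) (by omega) (by rw [hc3]; omega)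
    rw [PySem.List.pyGet?_of_nonneg _ (by omega : (0:Int) ≤ q - d)] at hrec
    unfold olrCat at hrec
    rw [show q.toNat - (PySem.Int.toChars a).length = (q - d).toNat by rw [hd]; omega, hrec]
    congr 2
    · omega
    · have : ((k+1:Nat):Int) * d = (k:Int) * d + d := hc1
      omega

theorem olr_csum_len (e : Nat) :
    ((olrCat 1 ((10 : Int) ^ e)).length : Int) = olrCsum e := by
  induction e with
  | zero => simp [olrCat, olrCsum, PySem.List.pyRange_one_eq_nil]
  | succ e ih =>
    have hle : (1 : Int) ≤ 10 ^ e := one_le_pow₀ (by norm_num)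
    have hpow : (10:Int) ^ (e+1) = 10 ^ e + 9 * 10 ^ e := by ring
    have h9 : (0:Int) ≤ 9 * 10 ^ e := by positivity
    have hle2 : (10 : Int) ^ e ≤ 10 ^ (e+1) := by rw [hpow]; omega
    rw [olr_cat_split 1 (10 ^ e) (10 ^ (e+1)) hle hle2]
    have hblk : olrCat ((10:Int) ^ e) ((10:Int) ^ (e+1)) = olrCat (10 ^ e) ((10 ^ e : Int) + ((9 * 10 ^ e : Nat) : Int)) := by
      have h10 : ((10:Int) ^ (e+1)) = (10 ^ e : Int) + ((9 * 10 ^ e : Nat) : Int) := by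
        push_cast
        ring
      rw [h10]
    have hcast : (((9 * 10 ^ e : Nat)) : Int) = 9 * 10 ^ e := by push_cast; ring
    rw [hblk, List.length_append]
    rw [olr_length_cat_const (e+1) (9 * 10 ^ e) (10 ^ e)
      (fun i hi hi2 => olr_length_toChars e i hi (by rw [hcast] at hi2; omega))]
    show (((olrCat 1 (10 ^ e)).length + 9 * 10 ^ e * (e + 1) : Nat) : Int) = olrCsum (e+1)
    rw [show olrCsum (e+1) = olrCsum e + ((e:Int) + 1) * (9 * 10 ^ e) from rfl, ← ih]
    push_cast
    ring

theorem olr_toDigits_len_pos (b n : Nat) : 0 < (Nat.toDigits b n).length := by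
  show 0 < (Nat.toDigitsCore b (n + 1) n []).length
  simp only [Nat.toDigitsCore]
  split
  · simp
  · rw [Nat.toDigitsCore_lens_eq]
    omega

theorem olr_toChars_len_pos (i : Int) : 0 < (PySem.Int.toChars i).length := by
  unfold PySem.Int.toChars
  split
  · simp
  · exact olr_toDigits_len_pos 10 _

theorem olr_len_cat_ge (K : Int) (h : 1 ≤ K) : K - 1 ≤ ((olrCat 1 K).length : Int) := by
  have hgen : ∀ (k : Nat) (b : Int), b = 1 + k → (k : Int) ≤ ((olrCat 1 b).length : Int) := by
    intro k
    induction k with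
    | zero => intro b hb; positivity
    | succ k ih =>
      intro b hb
      have hsplit : olrCat 1 b = olrCat 1 (1 + k) ++ olrCat (1 + k) b :=
        olr_cat_split 1 (1 + k) b (by omega) (by omega)
      rw [hsplit, List.length_append]
      have h1 := ih (1 + (k:Int)) rfl
      have h2 : 0 < (olrCat (1 + (k:Int)) b).length := by
        unfold olrCat
        rw [PySem.List.pyRange_one_cons (by omega : (1 + (k:Int)) < b), List.flatMap_cons]
        simp only [List.length_append]
        have := olr_toChars_len_pos (1 + (k:Int))
        omega
      push_cast
      push_cast at h1
      omega
  have := hgen (K - 1).toNat K (by omega)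
  omega

theorem olr_champLoop_run : ∀ (f : Nat) (q : Int) (e : Nat), 0 ≤ q → q.toNat < f →
    ∃ (q' : Int) (e' : Nat), e ≤ e' ∧ 0 ≤ q' ∧ q' < ((e' : Int) + 1) * (9 * 10 ^ e') ∧
      champLoop f q ((e : Int) + 1) (9 * 10 ^ e) (10 ^ e) = (q', (e' : Int) + 1, 10 ^ e') ∧
      q + olrCsum e = q' + olrCsum e' := by
  intro f
  induction f with
  | zero => intro q e h1 h2; omega
  | succ f ih =>
    intro q e h1 h2
    rw [champLoop]
    have hX : (0:Int) < ((e : Int) + 1) * (9 * 10 ^ e) := by positivity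
    by_cases hc : ((e : Int) + 1) * (9 * 10 ^ e) ≤ q
    · rw [if_pos hc]
      have h9 : (9:Int) ≤ ((e : Int) + 1) * (9 * 10 ^ e) := by
        have h10 : (1:Int) ≤ 10 ^ e := one_le_pow₀ (by norm_num)
        nlinarith
      obtain ⟨q', e', he, hq0, hqlt, heq, hsum⟩ :=
        ih (q - ((e : Int) + 1) * (9 * 10 ^ e)) (e + 1) (by omega) (by omega)
      refine ⟨q', e', by omega, hq0, hqlt, ?_, ?_⟩
      · rw [show ((e:Int) + 1) + 1 = (((e+1:Nat)):Int) + 1 by push_cast; ring,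
          show (9:Int) * 10 ^ e * 10 = 9 * 10 ^ (e+1) by ring,
          show (10:Int) ^ e * 10 = 10 ^ (e+1) by ring]
        exact heq
      · rw [show olrCsum (e+1) = olrCsum e + ((e:Int) + 1) * (9 * 10 ^ e) from rfl] at hsum
        omega
    · rw [if_neg hc]
      exact ⟨q, e, le_rfl, h1, by omega, rfl, rfl⟩

theorem olr_digit_int (v : Nat) (hv : v < 10) :
    PySem.Int.ofChars? [Nat.digitChar v] = some (v : Int) := by
  interval_cases v <;> decide

-- the heart: A's read of position p of the concatenation equals B's Champernowne computation
theorem olr_champ_digit (p K : Int) (hp : 0 ≤ p)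
    (hlen : p < ((olrCat 1 K).length : Int)) :
    ((PySem.List.pyGet? (olrCat 1 K) p).bind (fun c => PySem.Int.ofChars? [c])).getD 0
      = (fun t =>
          PySem.Int.mod (PySem.Int.floordiv (t.2.2 + PySem.Int.floordiv t.1 t.2.1)
            (10 ^ ((t.2.1 - 1 - PySem.Int.mod t.1 t.2.1).toNat))) 10)
        (champLoop (p.toNat + 1) p 1 9 1) := by
  -- run the loop (state e = 0)
  obtain ⟨q, e, -, hq0, hqlt, heq, hsum⟩ :=
    olr_champLoop_run (p.toNat + 1) p 0 hp (by omega)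
  rw [show olrCsum 0 = 0 from rfl] at hsum
  have heq' : champLoop (p.toNat + 1) p 1 9 1 = (q, (e : Int) + 1, 10 ^ e) := by
    rw [← heq]
    norm_num
  rw [heq']
  simp only
  -- abbreviations for the final state
  set d : Int := (e : Int) + 1 with hd
  have hdpos : (0 : Int) < d := by omega
  set k : Int := q / d with hk
  set r : Int := q % d with hr
  have hk0 : 0 ≤ k := Int.ediv_nonneg hq0 (by omega)
  have hr0 : 0 ≤ r := Int.emod_nonneg q (by omega)
  have hrd : r < d := Int.emod_lt_of_pos q hdpos
  have hkdr : k * d + r = q := by rw [hk, hr, mul_comm]; exact Int.mul_ediv_add_emod q d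
  have h10e1 : (1 : Int) ≤ 10 ^ e := one_le_pow₀ (by norm_num)
  have h10pow : (10 : Int) ^ (e + 1) = 10 ^ e + 9 * 10 ^ e := by ring
  -- K is large enough to contain the block of the final state
  have hK1 : (1 : Int) < K := by
    by_contra hc
    have : olrCat 1 K = [] := by
      unfold olrCat
      rw [PySem.List.pyRange_one_eq_nil (by omega)]
      rfl
    rw [this] at hlen
    simp at hlen
    omega
  have hKe : (10 : Int) ^ e ≤ K := by
    by_contra hc
    push Not at hc
    have hsp : olrCat 1 (10 ^ e) = olrCat 1 K ++ olrCat K (10 ^ e) :=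
      olr_cat_split 1 K (10 ^ e) (by omega) (by omega)
    have hthis := olr_csum_len e
    rw [hsp, List.length_append] at hthis
    push_cast at hthis
    omega
  -- read position p = csum e + q : it lands in the suffix olrCat (10^e) K
  have hsp1 : olrCat 1 K = olrCat 1 (10 ^ e) ++ olrCat (10 ^ e) K :=
    olr_cat_split 1 (10 ^ e) K h10e1 hKe
  have hcl := olr_csum_len e
  have hstep1 : PySem.List.pyGet? (olrCat 1 K) p = PySem.List.pyGet? (olrCat (10 ^ e) K) q := by
    rw [hsp1, PySem.List.pyGet?_of_nonneg _ hp,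
      List.getElem?_append_right (by omega), PySem.List.pyGet?_of_nonneg _ hq0]
    congr 1
    omega
  -- the block [10^e, B) of (e+1)-digit numbers that contains the read, with B ≤ 10^(e+1)
  have hqlen : q < ((olrCat (10 ^ e) K).length : Int) := by
    rw [hsp1, List.length_append] at hlen
    push_cast at hlen
    omega
  obtain ⟨B, hB1, hB2, hstep2, hqB⟩ :
      ∃ B : Int, (10:Int) ^ e ≤ B ∧ B ≤ 10 ^ (e + 1) ∧
        PySem.List.pyGet? (olrCat (10 ^ e) K) q = PySem.List.pyGet? (olrCat (10 ^ e) B) q ∧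
        q < (B - 10 ^ e) * d := by
    by_cases hKB : K ≤ 10 ^ (e + 1)
    · -- the whole suffix consists of (e+1)-digit numbers
      have hlenc : (olrCat (10 ^ e) ((10:Int) ^ e + ((K - 10 ^ e).toNat : Int))).length
          = (K - 10 ^ e).toNat * (e + 1) :=
        olr_length_cat_const (e + 1) (K - 10 ^ e).toNat (10 ^ e)
          (fun i hi hi2 => olr_length_toChars e i hi (by omega))
      have hKe' : (10:Int) ^ e + ((K - 10 ^ e).toNat : Int) = K := by omega
      rw [hKe'] at hlenc
      refine ⟨K, hKe, hKB, rfl, ?_⟩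
      rw [hlenc] at hqlen
      push_cast at hqlen
      have hcc : ((K - 10 ^ e).toNat : Int) = K - 10 ^ e := by omega
      rw [hcc] at hqlen
      calc q < (K - 10 ^ e) * ((e : Int) + 1) := hqlen
        _ = (K - 10 ^ e) * d := by rw [hd]
    · push Not at hKB
      have hsp2 : olrCat (10 ^ e) K
          = olrCat (10 ^ e) (10 ^ (e+1)) ++ olrCat (10 ^ (e+1)) K :=
        olr_cat_split (10 ^ e) (10 ^ (e+1)) K (by omega) (by omega)
      have hlenb : (olrCat ((10:Int) ^ e) ((10:Int) ^ e + ((9 * 10 ^ e : Nat) : Int))).length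
          = (9 * 10 ^ e) * (e + 1) :=
        olr_length_cat_const (e + 1) (9 * 10 ^ e) (10 ^ e)
          (fun i hi hi2 => olr_length_toChars e i hi
            (by push_cast at hi2; omega))
      have hib : (10:Int) ^ e + ((9 * 10 ^ e : Nat) : Int) = 10 ^ (e + 1) := by
        push_cast
        ring
      rw [hib] at hlenb
      -- q stays inside the full block by the loop's exit condition
      have hqblk : q < ((olrCat (10 ^ e) ((10:Int) ^ (e+1))).length : Int) := by
        rw [hlenb]
        push_cast
        calc q < ((e : Int) + 1) * (9 * 10 ^ e) := hqlt
          _ = 9 * 10 ^ e * ((e : Int) + 1) := by ring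
      refine ⟨10 ^ (e+1), by omega, le_rfl, ?_, ?_⟩
      · rw [hsp2, PySem.List.pyGet?_of_nonneg _ hq0,
          List.getElem?_append_left (by rw [hlenb]; omega),
          ← PySem.List.pyGet?_of_nonneg _ hq0]
      · calc q < ((e : Int) + 1) * (9 * 10 ^ e) := hqlt
          _ = ((10:Int) ^ (e+1) - 10 ^ e) * d := by rw [hd]; ring
  -- index into the block of uniform digit-length e+1
  have hkdr' : k * ((e:Int) + 1) + r = q := by rw [← hd]; exact hkdr
  have hrd' : r < (e:Int) + 1 := by rw [← hd]; exact hrd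
  have hqB' : q < (B - 10 ^ e) * ((e:Int) + 1) := by rw [← hd]; exact hqB
  have hknat : ((k.toNat : Int)) = k := Int.toNat_of_nonneg hk0
  have hkBa : k < B - 10 ^ e :=
    lt_of_mul_lt_mul_right (by linarith [hkdr', hr0, hqB']) (by omega : (0:Int) ≤ (e:Int) + 1)
  have hkB : (10:Int) ^ e + (k.toNat : Int) < B := by
    rw [hknat]
    linarith [hkBa]
  have hread := olr_cat_get_const (e + 1) k.toNat (10 ^ e) B q
    (fun i hi hi2 => olr_length_toChars e i hi (lt_of_lt_of_le hi2 hB2))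
    hkB
    (by rw [hknat]; push_cast; linarith [hkdr', hr0])
    (by rw [hknat]; push_cast; linarith [hkdr', hrd'])
  have hidx : (q - (k.toNat : Int) * ((e + 1 : Nat) : Int)).toNat = r.toNat := by
    have hh : q - (k.toNat : Int) * ((e + 1 : Nat) : Int) = r := by
      rw [hknat]
      push_cast
      linarith [hkdr']
    rw [hh]
  -- the hit number and its digit
  have h1n : (10:Int) ^ e ≤ (10:Int) ^ e + (k.toNat : Int) := by
    rw [hknat]
    linarith [hk0]
  have h2n : (10:Int) ^ e + (k.toNat : Int) < 10 ^ (e + 1) := lt_of_lt_of_le hkB hB2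
  have hrle : r.toNat ≤ e := by omega
  have hchar := olr_getElem_toChars e r.toNat ((10:Int) ^ e + (k.toNat : Int)) h1n h2n hrle
  rw [hstep1, hstep2, hread, hidx, hchar]
  simp only [Option.bind_some]
  rw [olr_digit_int _ (Nat.mod_lt _ (by norm_num)), Option.getD_some]
  -- now compute B's arithmetic expression
  have hfd : PySem.Int.floordiv q d = k := by
    rw [PySem.Int.floordiv_eq_ediv_of_pos hdpos, ← hk]
  have hmd : PySem.Int.mod q d = r := by
    rw [PySem.Int.mod_eq_emod_of_pos hdpos, ← hr]
  rw [hfd, hmd]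
  have hexp : ((d - 1 - r).toNat) = e - r.toNat := by rw [hd]; omega
  rw [hexp]
  have hN : ((((10:Int) ^ e + (k.toNat : Int)).toNat : Int)) = (10:Int) ^ e + (k.toNat : Int) :=
    Int.toNat_of_nonneg (by positivity)
  rw [← hknat, ← hN]
  have hpw : ((10 ^ (e - r.toNat) : Nat) : Int) = (10:Int) ^ (e - r.toNat) := by
    push_cast
    ring
  rw [← hpw, PySem.Int.floordiv_natCast,
    show (10:Int) = ((10:Nat):Int) from rfl, PySem.Int.mod_natCast]
  simp

-- ===== VERDICT (by name: the statement is the Claim_ definition above) =====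
theorem olympic_rings_spec : Claim_equal_olympic_rings := by
  unfold Claim_equal_olympic_rings
  intro n _
  unfold Spec_olympic_rings
  by_cases hn : n < 1
  · rw [olympic_rings, olympic_rings_alt, if_pos hn, if_pos hn]
  · have hn1 : 1 ≤ n := by omega
    rw [olympic_rings, olympic_rings_alt, if_neg hn, if_neg hn]
    show [n * 6 - 2, n * 6 - 4, n * 6 - 6, n * 6 * 2 - 4, n * 6 * 2 - 6].foldl
        (fun r p => r + ((PySem.Str.pyGet?
          ((PySem.List.pyRange 1 (n * 6 * 2) 1).foldl (fun s i => s ++ PySem.Int.toStr i) "")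
          p).bind (fun c => PySem.Int.ofChars? [c])).getD 0) 0
      = [6 * n - 2, 6 * n - 4, 6 * n - 6, 2 * (6 * n) - 4, 2 * (6 * n) - 6].foldl (fun r p =>
          let t := champLoop (p.toNat + 1) p 1 9 1
          let q := t.1
          let d := t.2.1
          let start := t.2.2
          let num := start + PySem.Int.floordiv q d
          r + PySem.Int.mod (PySem.Int.floordiv num
            (10 ^ ((d - 1 - PySem.Int.mod q d).toNat))) 10) 0
    rw [show n * 6 = 6 * n from mul_comm n 6, show 6 * n * 2 = 2 * (6 * n) by ring]
    have hM : 6 ≤ 6 * n := by omega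
    have hlenK : 2 * (6 * n) - 1 ≤ ((olrCat 1 (2 * (6 * n))).length : Int) :=
      olr_len_cat_ge (2 * (6 * n)) (by omega)
    have hget : ∀ (s : String) (p : Int),
        PySem.Str.pyGet? s p = PySem.List.pyGet? s.toList p := by
      intro s p
      simp [PySem.Str.pyGet?]
    simp only [List.foldl_cons, List.foldl_nil, hget, olr_foldA]
    rw [olr_champ_digit (6 * n - 2) (2 * (6 * n)) (by omega) (by omega),
      olr_champ_digit (6 * n - 4) (2 * (6 * n)) (by omega) (by omega),
      olr_champ_digit (6 * n - 6) (2 * (6 * n)) (by omega) (by omega),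
      olr_champ_digit (2 * (6 * n) - 4) (2 * (6 * n)) (by omega) (by omega),
      olr_champ_digit (2 * (6 * n) - 6) (2 * (6 * n)) (by omega) (by omega)]
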